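-- pv_equiv track=rewrite | github.com/SpikeXiong/SmartRecite | server/text_processing/file_importer/pdf_importer.py | _find_closest_title_key
-- ===== SOURCE A (Python) =====
-- def _find_closest_title_key(title_hierarchy, page_num, max_count):
--     """找到当前页面最近的标题键"""
--     # 从当前页面的最后一个标题开始向前查找
--     for i in range(max_count, 0, -1):
--         title_key = f"{page_num}_{i}"
--         if title_key in title_hierarchy:
--             return title_key
--
--     # 如果当前页面没有标题，查找前面页面的标题
--     # 优化：按页码筛选标题键，避免不必要的循环
--     prev_page_keys = {}
--     for key in title_hierarchy.keys():
--         if '_' in key:  # 确保键的格式正确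
--             try:
--                 key_page = int(key.split('_')[0])
--                 if key_page < page_num:  # 只考虑当前页之前的页
--                     if key_page not in prev_page_keys:
--                         prev_page_keys[key_page] = []
--                     prev_page_keys[key_page].append(key)
--             except (ValueError, IndexError):
--                 continue
--
--     # 从最近的前一页开始查找
--     for prev_page in range(page_num-1, 0, -1):
--         if prev_page in prev_page_keys and prev_page_keys[prev_page]:
--             # 按标题编号降序排序，获取最后一个标题
--             sorted_keys = sorted(prev_page_keys[prev_page],
--                                 key=lambda x: int(x.split('_')[1]),
--                                 reverse=True)
--             return sorted_keys[0]
--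
--     # 如果没有找到任何标题，返回一个默认键
--     return "default"
-- ===== SOURCE B (Python) =====
-- def _page_of(key):
--     try:
--         return int(key.split('_')[0])
--     except ValueError:
--         return None
--
--
-- def _find_closest_title_key(title_hierarchy, page_num, max_count):
--     # Phase 1 (as the task states): largest i <= max_count with "page_num_i" present.
--     for i in range(max_count, 0, -1):
--         title_key = f"{page_num}_{i}"
--         if title_key in title_hierarchy:
--             return title_key
--
--     # Phase 2: instead of grouping keys per page into a dict, counting pages
--     # down one by one and sorting the chosen group, do one pass tracking the
--     # greatest prior page that has a key, then take the first key with the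
--     # maximal title index on that page (index parsing deferred to the chosen
--     # page only, exactly like A's sort does).
--     best_page = None
--     for key in title_hierarchy:
--         if '_' in key:
--             p = _page_of(key)
--             if p is not None and 0 < p < page_num and (best_page is None or p > best_page):
--                 best_page = p
--     if best_page is None:
--         return "default"
--     group = [k for k in title_hierarchy if '_' in k and _page_of(k) == best_page]
--     return max(group, key=lambda x: int(x.split('_')[1]))
-- ===== Notes on version B (the rewrite author's own statement) =====
-- stated objective: alternative
-- what changed: The per-page grouping dict, the countdown loop over all page numbers below page_num and the per-group sort are replaced by one pass tracking the greatest prior page that has a key, then picking the first key with the maximal title index on that page; the first phase (largest i <= max_count with key 'page_num_i' present) is kept.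
import Mathlib
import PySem

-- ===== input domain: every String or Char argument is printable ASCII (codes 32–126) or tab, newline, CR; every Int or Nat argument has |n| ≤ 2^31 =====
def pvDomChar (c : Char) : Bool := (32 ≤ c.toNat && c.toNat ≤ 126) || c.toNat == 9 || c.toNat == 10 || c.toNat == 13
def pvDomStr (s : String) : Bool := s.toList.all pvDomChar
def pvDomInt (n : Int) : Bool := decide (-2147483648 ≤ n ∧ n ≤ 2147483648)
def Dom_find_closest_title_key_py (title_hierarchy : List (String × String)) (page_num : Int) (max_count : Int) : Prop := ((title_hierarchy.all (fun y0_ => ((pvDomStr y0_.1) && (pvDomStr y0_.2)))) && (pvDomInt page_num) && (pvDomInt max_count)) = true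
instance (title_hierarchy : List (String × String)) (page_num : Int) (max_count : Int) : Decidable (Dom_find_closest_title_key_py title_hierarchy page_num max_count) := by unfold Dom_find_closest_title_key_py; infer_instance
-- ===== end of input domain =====

-- B replaces A's per-page grouping dict + countdown over all pages below page_num + per-group sort
-- by one pass tracking the greatest prior page with a key, then the first max-index key of that page.

-- ===== PORT A =====
-- helpers shared by both ports: f"{page_num}_{i}", the phase-1 countdown loop, key.split('_') parsing
def pvCanon (page i : Int) : String := PySem.Int.toStr page ++ "_" ++ PySem.Int.toStr i

-- for i in range(max_count, 0, -1): if f"{page_num}_{i}" in title_hierarchy: return it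
def pvFirstHit (d : PySem.Dict String String) (page : Int) : List Int → Option String
  | [] => none
  | i :: rest => if d.contains (pvCanon page i) then some (pvCanon page i) else pvFirstHit d page rest

def pvSplit (k : String) : List String := (PySem.Str.split? k "_").getD []   -- key.split('_'); sep ≠ "" so never none
def pvPage? (k : String) : Option Int := PySem.Int.ofStr? (PySem.List.pyGetD (pvSplit k) 0 "")
-- int(key.split('_')[1]) as a total form (default 0): exact under Pre_, which excludes the ValueError inputs
def pvIdxD (k : String) : Int := (PySem.Int.ofStr? (PySem.List.pyGetD (pvSplit k) 1 "")).getD 0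

def pvBuildPrev (page_num : Int) (keys : List String) : PySem.Dict Int (List String) :=
  keys.foldl (fun m key =>
    if PySem.Str.isIn "_" key then
      match pvPage? key with
      | some key_page =>
        if key_page < page_num then
          (if m.contains key_page then m else m.insert key_page []).modify key_page [] (fun l => l ++ [key])
        else m
      | none => m
    else m) PySem.Dict.empty

def pvLoopPrev (prev : PySem.Dict Int (List String)) : List Int → String
  | [] => "default"
  | q :: rest =>
    if prev.contains q && !(prev.getD q []).isEmpty then
      PySem.List.pyGetD (PySem.List.sorted (prev.getD q []) pvIdxD true) 0 "default"
    else pvLoopPrev prev rest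

def find_closest_title_key_py (title_hierarchy : List (String × String)) (page_num : Int) (max_count : Int) : String :=
  let d := PySem.Dict.ofList title_hierarchy
  match pvFirstHit d page_num (PySem.List.pyRange max_count 0 (-1)) with
  | some tk => tk
  | none => pvLoopPrev (pvBuildPrev page_num d.keys) (PySem.List.pyRange (page_num - 1) 0 (-1))

-- ===== PORT B =====
-- if p is not None and 0 < p < page_num and (best_page is None or p > best_page): best_page = p
def pvBestStep (pn : Int) (bp : Option Int) (key : String) : Option Int :=
  if PySem.Str.isIn "_" key then
    match pvPage? key with
    | some p =>
      match bp with
      | none => if 0 < p ∧ p < pn then some p else none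
      | some b => if 0 < p ∧ p < pn ∧ b < p then some p else some b
    | none => bp
  else bp

def find_closest_title_key_py_alt (title_hierarchy : List (String × String)) (page_num : Int) (max_count : Int) : String :=
  let d := PySem.Dict.ofList title_hierarchy
  match pvFirstHit d page_num (PySem.List.pyRange max_count 0 (-1)) with
  | some tk => tk
  | none =>
    match d.keys.foldl (pvBestStep page_num) none with
    | none => "default"
    | some b =>
      -- group = [k for k in title_hierarchy if '_' in k and _page_of(k) == best_page]; max(group, key=idx)
      match PySem.List.max? (d.keys.filter (fun k => PySem.Str.isIn "_" k && (pvPage? k == some b))) pvIdxD with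
      | some m => m
      | none => "default"   -- unreachable: the group of best_page is nonempty

-- ===== PRECONDITION & SPEC =====
-- key is literally f"{page_num}_{i}" for some 1 ≤ i ≤ max_count (phase 1 returns before any parsing)
def pvHitB (page_num max_count : Int) (k : String) : Bool :=
  decide ((PySem.Int.toChars page_num ++ ['_']) <+: k.toList) &&
  (match PySem.Int.ofChars? (k.toList.drop (PySem.Int.toChars page_num ++ ['_']).length) with
   | some i => (PySem.Int.toChars i == k.toList.drop (PySem.Int.toChars page_num ++ ['_']).length) &&
               decide (1 ≤ i ∧ i ≤ max_count)
   | none => false)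

-- key of a page strictly between 0 and page_num (a prior-page candidate both programs consider)
def pvCandB (page_num : Int) (k : String) : Bool :=
  PySem.Str.isIn "_" k && (match pvPage? k with | some p => decide (0 < p ∧ p < page_num) | none => false)

def pvIdxOkB (k : String) : Bool := (PySem.Int.ofStr? (PySem.List.pyGetD (pvSplit k) 1 "")).isSome

-- Pre_ excludes exactly the inputs on which A raises an uncaught ValueError: no phase-1 hit and the
-- nearest prior page that has keys contains a key whose title-index part is not an int literal
-- (A raises while sorting that group; B raises the same ValueError while taking that group's max).
def Pre_find_closest_title_key_py (title_hierarchy : List (String × String)) (page_num : Int) (max_count : Int) : Prop :=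
  (∃ k ∈ (PySem.Dict.ofList title_hierarchy).keys, pvHitB page_num max_count k = true) ∨
  (∀ k ∈ (PySem.Dict.ofList title_hierarchy).keys,
    (pvCandB page_num k = true ∧
      ∀ k' ∈ (PySem.Dict.ofList title_hierarchy).keys, pvCandB page_num k' = true →
        (pvPage? k').getD 0 ≤ (pvPage? k).getD 0) → pvIdxOkB k = true)
instance (title_hierarchy : List (String × String)) (page_num : Int) (max_count : Int) : Decidable (Pre_find_closest_title_key_py title_hierarchy page_num max_count) := by unfold Pre_find_closest_title_key_py; infer_instance

def pvWitness_find_closest_title_key_py : (List (String × String)) × Int × Int := ([("1_1", "t"), ("2_3", "u")], 3, 0)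

def Spec_find_closest_title_key_py (title_hierarchy : List (String × String)) (page_num : Int) (max_count : Int) (out : String) : Prop := out = find_closest_title_key_py_alt title_hierarchy page_num max_count
instance (title_hierarchy : List (String × String)) (page_num : Int) (max_count : Int) (out : String) : Decidable (Spec_find_closest_title_key_py title_hierarchy page_num max_count out) := by unfold Spec_find_closest_title_key_py; infer_instance

-- ===== CLAIM (what is proved, stated in full; the proofs are below) =====
def Claim_equal_find_closest_title_key_py : Prop := ∀ (title_hierarchy : List (String × String)) (page_num : Int) (max_count : Int), Dom_find_closest_title_key_py title_hierarchy page_num max_count → Pre_find_closest_title_key_py title_hierarchy page_num max_count → Spec_find_closest_title_key_py title_hierarchy page_num max_count (find_closest_title_key_py title_hierarchy page_num max_count)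

-- ===== LEMMAS AND PROOFS =====

-- proof-side notions ---------------------------------------------------------
def pvPage1? (pn : Int) (k : String) : Option Int := if pvCandB pn k = true then pvPage? k else none
def pvPages (pn : Int) (ks : List String) : List Int := ks.filterMap (pvPage1? pn)
def pvMaxStep (o : Option Int) (p : Int) : Option Int :=
  match o with | none => some p | some b => if b < p then some p else some b

def pvGroupB (pn p : Int) (k : String) : Bool :=
  PySem.Str.isIn "_" k && (pvPage? k == some p) && decide (p < pn)

theorem pvCandB_page (pn : Int) (k : String) (h : pvCandB pn k = true) :
    ∃ p, pvPage? k = some p ∧ 0 < p ∧ p < pn := by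
  unfold pvCandB at h
  rcases Bool.and_eq_true_iff.mp h with ⟨-, h2⟩
  cases hp : pvPage? k with
  | none => rw [hp] at h2; cases h2
  | some p => rw [hp] at h2; exact ⟨p, rfl, by simpa using h2⟩

-- B's fold is the running-max fold over the candidate pages
theorem pvBestFold_eq (pn : Int) (ks : List String) (init : Option Int) :
    ks.foldl (pvBestStep pn) init = (pvPages pn ks).foldl pvMaxStep init := by
  unfold pvPages
  rw [List.foldl_filterMap]
  apply PySem.List.foldl_congr_mem
  intro bp k _
  unfold pvPage1? pvBestStep pvCandB
  cases h1 : PySem.Str.isIn "_" k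
  · simp [h1]
  · cases h2 : pvPage? k with
    | none => simp [h2]
    | some p =>
      by_cases h3 : 0 < p ∧ p < pn
      · cases bp with
        | none => simp [h2, h3, pvMaxStep]
        | some b =>
          by_cases h4 : b < p
          · simp [h2, h3, h4, pvMaxStep]
          · simp [h2, h3, h4, pvMaxStep]
      · cases bp with
        | none => simp [h3]
        | some b =>
          have h5 : ¬(0 < p ∧ p < pn ∧ b < p) := fun hh => h3 ⟨hh.1, hh.2.1⟩
          simp [h3, h5]

-- running max over Int, characterised
theorem pvMaxFold_spec (l : List Int) :
    (l.foldl pvMaxStep none = none ∧ l = []) ∨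
    ∃ b, l.foldl pvMaxStep none = some b ∧ b ∈ l ∧ ∀ p ∈ l, p ≤ b := by
  induction l using List.reverseRecOn with
  | nil => exact Or.inl ⟨rfl, rfl⟩
  | append_singleton l x ih =>
    rw [List.foldl_append, List.foldl_cons, List.foldl_nil]
    rcases ih with ⟨hnone, rfl⟩ | ⟨b, hfold, hmem, hall⟩
    · rw [hnone]
      refine Or.inr ⟨x, rfl, by simp, ?_⟩
      intro p hp; simp at hp; omega
    · rw [hfold]
      by_cases hlt : b < x
      · refine Or.inr ⟨x, by simp [pvMaxStep, hlt], by simp, ?_⟩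
        intro p hp
        rcases List.mem_append.mp hp with hp | hp
        · exact le_of_lt (lt_of_le_of_lt (hall p hp) hlt)
        · simp at hp; omega
      · refine Or.inr ⟨b, by simp [pvMaxStep, hlt], List.mem_append_left _ hmem, ?_⟩
        intro p hp
        rcases List.mem_append.mp hp with hp | hp
        · exact hall p hp
        · simp at hp; omega

theorem pvMem_pages (pn p : Int) (ks : List String) :
    p ∈ pvPages pn ks ↔ ∃ k ∈ ks, pvCandB pn k = true ∧ pvPage? k = some p := by
  unfold pvPages
  rw [List.mem_filterMap]
  constructor
  · rintro ⟨k, hk, hpk⟩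
    unfold pvPage1? at hpk
    by_cases hc : pvCandB pn k = true
    · rw [if_pos hc] at hpk; exact ⟨k, hk, hc, hpk⟩
    · rw [if_neg hc] at hpk; cases hpk
  · rintro ⟨k, hk, hc, hpk⟩
    exact ⟨k, hk, by unfold pvPage1?; rw [if_pos hc]; exact hpk⟩

theorem pvGroupB_iff (pn q : Int) (hq : 0 < q) (k : String) :
    pvGroupB pn q k = (pvCandB pn k && ((pvPage? k).getD 0 == q)) := by
  unfold pvGroupB pvCandB
  cases h1 : PySem.Str.isIn "_" k
  · simp
  · cases h2 : pvPage? k with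
    | none => simp
    | some p =>
      by_cases hpq : p = q
      · subst hpq
        by_cases h3 : p < pn
        · simp [h3, hq]
        · simp [h3]
      · simp [show (p == q) = false from beq_eq_false_iff_ne.mpr hpq]

theorem pvGroupB_to_page (pn q : Int) (hq : 0 < q) (k : String) (h : pvGroupB pn q k = true) :
    pvCandB pn k = true ∧ pvPage? k = some q := by
  rw [pvGroupB_iff pn q hq k] at h
  rcases Bool.and_eq_true_iff.mp h with ⟨hc, hg⟩
  rcases pvCandB_page pn k hc with ⟨p, hp, -, -⟩
  refine ⟨hc, ?_⟩
  rw [hp]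
  have : p = q := by rw [hp] at hg; simpa using hg
  rw [this]

-- B's group predicate is A's group predicate at the chosen page
theorem pvGroup_eq (pn b : Int) (hb : b < pn) (ks : List String) :
    ks.filter (fun k => PySem.Str.isIn "_" k && (pvPage? k == some b)) = ks.filter (pvGroupB pn b) := by
  apply List.filter_congr
  intro k _
  unfold pvGroupB
  simp [hb]

-- first-max characterisation of Python max()
theorem pvMax?_spec (g : List String) :
    (PySem.List.max? g pvIdxD = none ∧ g = []) ∨
    ∃ m, PySem.List.max? g pvIdxD = some m := by
  cases h : PySem.List.max? g pvIdxD with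
  | none => exact Or.inl ⟨rfl, (PySem.List.max?_eq_none_iff g pvIdxD).mp h⟩
  | some m => exact Or.inr ⟨m, rfl⟩

theorem pvInsertBy_head? (x : String) (acc : List String) :
    (PySem.List.insertBy (fun a b => decide (pvIdxD b < pvIdxD a)) x acc).head? =
      some (match acc.head? with
            | none => x
            | some y => if pvIdxD y < pvIdxD x then x else y) := by
  cases acc with
  | nil => simp [PySem.List.insertBy]
  | cons y ys =>
    by_cases h : pvIdxD y < pvIdxD x
    · simp [PySem.List.insertBy, h]
    · simp [PySem.List.insertBy, h]

theorem pvFoldInsert_head? (g : List String) : ∀ (acc : List String),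
    (g.foldl (fun acc x => PySem.List.insertBy (fun a b => decide (pvIdxD b < pvIdxD a)) x acc) acc).head? =
      g.foldl (fun o x => match o with
                          | none => some x
                          | some m => if pvIdxD m < pvIdxD x then some x else some m) acc.head? := by
  induction g with
  | nil => intro acc; rfl
  | cons x g ih =>
    intro acc
    rw [List.foldl_cons, List.foldl_cons, ih, pvInsertBy_head?]
    cases acc with
    | nil => rfl
    | cons y ys =>
      by_cases h : pvIdxD y < pvIdxD x
      · simp [h]
      · simp [h]

-- head of sorted(..., reverse=True) is max(...)
theorem pvHead?_sorted_rev (g : List String) :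
    (PySem.List.sorted g pvIdxD true).head? = PySem.List.max? g pvIdxD := by
  rw [PySem.List.sorted_rev_eq_foldl_insertBy, pvFoldInsert_head?]
  simp only [List.head?_nil]
  unfold PySem.List.max?
  apply PySem.List.foldl_congr_mem
  intro o x _
  cases o <;> rfl

-- the prev_page_keys dict, characterised
theorem pvBuildStep_getD (m : PySem.Dict Int (List String)) (kp p : Int) (k : String) :
    ((if m.contains kp then m else m.insert kp []).modify kp [] (fun l => l ++ [k])).getD p [] =
      if p = kp then m.getD p [] ++ [k] else m.getD p [] := by
  by_cases hc : m.contains kp = true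
  · rw [if_pos hc, PySem.Dict.getD_modify]
    by_cases hp : p = kp <;> simp [hp]
  · rw [if_neg hc, PySem.Dict.getD_modify]
    by_cases hp : p = kp
    · subst hp
      rw [if_pos rfl, if_pos rfl, PySem.Dict.getD_insert_self,
        PySem.Dict.getD_of_not_contains m [] (by simpa using hc)]
    · rw [if_neg hp, if_neg hp, PySem.Dict.getD_insert_of_ne m [] [] hp]

theorem pvBuildStep_contains (m : PySem.Dict Int (List String)) (kp p : Int) (k : String) :
    ((if m.contains kp then m else m.insert kp []).modify kp [] (fun l => l ++ [k])).contains p =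
      (p == kp || m.contains p) := by
  by_cases hc : m.contains kp = true
  · rw [if_pos hc, PySem.Dict.contains_modify]
  · rw [if_neg hc, PySem.Dict.contains_modify, PySem.Dict.contains_insert]
    cases hpk : (p == kp) <;> simp

theorem pvBuildAux_getD (pn : Int) (ks : List String) : ∀ (m : PySem.Dict Int (List String)) (p : Int),
    (ks.foldl (fun m key =>
      if PySem.Str.isIn "_" key then
        match pvPage? key with
        | some key_page =>
          if key_page < pn then
            (if m.contains key_page then m else m.insert key_page []).modify key_page [] (fun l => l ++ [key])
          else m
        | none => m
      else m) m).getD p [] = m.getD p [] ++ ks.filter (pvGroupB pn p) := by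
  induction ks with
  | nil => intro m p; simp
  | cons k ks ih =>
    intro m p
    rw [List.foldl_cons, List.filter_cons]
    cases h1 : PySem.Str.isIn "_" k with
    | false =>
      rw [ih]
      have : pvGroupB pn p k = false := by unfold pvGroupB; rw [h1]; rfl
      simp [this]
    | true =>
      cases h2 : pvPage? k with
      | none =>
        rw [ih]
        have : pvGroupB pn p k = false := by unfold pvGroupB; rw [h1, h2]; simp
        simp [this]
      | some kp =>
        by_cases h3 : kp < pn
        · have hstep := pvBuildStep_getD m kp p k
          simp only [h1, if_true, h2, if_pos h3]
          rw [ih, hstep]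
          by_cases hp : p = kp
          · have : pvGroupB pn p k = true := by
              unfold pvGroupB; rw [h1, h2]; subst hp; simp [h3]
            rw [if_pos hp, if_pos this]
            simp
          · have : pvGroupB pn p k = false := by
              unfold pvGroupB; rw [h1, h2]
              simp [show (some kp == some p) = false by simpa using fun h => hp h.symm]
            rw [if_neg hp, if_neg (by simp [this])]
        · have : pvGroupB pn p k = false := by
            unfold pvGroupB; rw [h1, h2]
            by_cases hp : p = kp
            · subst hp; simp [h3]
            · simp [show (some kp == some p) = false by simpa using fun h => hp h.symm]
          simp only [h1, if_true, h2, if_neg h3]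
          rw [ih]
          simp [this]

theorem pvBuildAux_contains (pn : Int) (ks : List String) : ∀ (m : PySem.Dict Int (List String)) (p : Int),
    (ks.foldl (fun m key =>
      if PySem.Str.isIn "_" key then
        match pvPage? key with
        | some key_page =>
          if key_page < pn then
            (if m.contains key_page then m else m.insert key_page []).modify key_page [] (fun l => l ++ [key])
          else m
        | none => m
      else m) m).contains p = (m.contains p || ks.any (pvGroupB pn p)) := by
  induction ks with
  | nil => intro m p; simp
  | cons k ks ih =>
    intro m p
    rw [List.foldl_cons, List.any_cons]
    cases h1 : PySem.Str.isIn "_" k with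
    | false =>
      rw [ih]
      have : pvGroupB pn p k = false := by unfold pvGroupB; rw [h1]; rfl
      simp [this]
    | true =>
      cases h2 : pvPage? k with
      | none =>
        rw [ih]
        have : pvGroupB pn p k = false := by unfold pvGroupB; rw [h1, h2]; simp
        simp [this]
      | some kp =>
        by_cases h3 : kp < pn
        · have hstep := pvBuildStep_contains m kp p k
          simp only [h1, if_true, h2, if_pos h3]
          rw [ih, hstep]
          by_cases hp : p = kp
          · have : pvGroupB pn p k = true := by
              unfold pvGroupB; rw [h1, h2]; subst hp; simp [h3]
            subst hp
            simp [this]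
          · have : pvGroupB pn p k = false := by
              unfold pvGroupB; rw [h1, h2]
              simp [show (some kp == some p) = false by simpa using fun h => hp h.symm]
            simp [this, show (p == kp) = false by simpa using hp]
        · have : pvGroupB pn p k = false := by
            unfold pvGroupB; rw [h1, h2]
            by_cases hp : p = kp
            · subst hp; simp [h3]
            · simp [show (some kp == some p) = false by simpa using fun h => hp h.symm]
          simp only [h1, if_true, h2, if_neg h3]
          rw [ih]
          simp [this]

theorem pvBuildPrev_getD (pn : Int) (ks : List String) (p : Int) :
    (pvBuildPrev pn ks).getD p [] = ks.filter (pvGroupB pn p) := by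
  unfold pvBuildPrev
  rw [pvBuildAux_getD]
  simp [PySem.Dict.getD_empty]

theorem pvBuildPrev_contains (pn : Int) (ks : List String) (p : Int) :
    (pvBuildPrev pn ks).contains p = ks.any (pvGroupB pn p) := by
  unfold pvBuildPrev
  rw [pvBuildAux_contains]
  simp [PySem.Dict.contains_empty]

-- the countdown loop is find? on the countdown range
theorem pvLoopPrev_eq_find? (prev : PySem.Dict Int (List String)) (l : List Int) :
    pvLoopPrev prev l =
      match l.find? (fun q => prev.contains q && !(prev.getD q []).isEmpty) with
      | some q => PySem.List.pyGetD (PySem.List.sorted (prev.getD q []) pvIdxD true) 0 "default"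
      | none => "default" := by
  induction l with
  | nil => rfl
  | cons q rest ih =>
    by_cases h : (prev.contains q && !(prev.getD q []).isEmpty) = true
    · rw [pvLoopPrev, if_pos h, List.find?_cons]; simp only [h]
    · rw [pvLoopPrev, if_neg h, List.find?_cons, ih]
      have h' : (prev.contains q && !(prev.getD q []).isEmpty) = false := by simpa using h
      simp only [h']

theorem pvMem_countdown (a q : Int) : q ∈ PySem.List.pyRange a 0 (-1) ↔ 0 < q ∧ q ≤ a := by
  rw [PySem.List.pyRange_neg_one]
  simp only [List.mem_map, List.mem_range]
  constructor
  · rintro ⟨k, hk, rfl⟩; omega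
  · rintro ⟨h1, h2⟩; exact ⟨(a - q).toNat, by omega, by omega⟩

theorem pvCountdown_pairwise (a : Int) : (PySem.List.pyRange a 0 (-1)).Pairwise (· > ·) := by
  rw [PySem.List.pyRange_neg_one]
  refine List.Pairwise.map _ (fun i j h => ?_) (List.pairwise_lt_range)
  omega

-- find? on a strictly decreasing list returns the greatest satisfying element
theorem pvFind?_desc (l : List Int) (p : Int → Bool) (q0 : Int) (hl : l.Pairwise (· > ·))
    (hmem : q0 ∈ l) (hq0 : p q0 = true) (hmax : ∀ q ∈ l, p q = true → q ≤ q0) :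
    l.find? p = some q0 := by
  induction l with
  | nil => cases hmem
  | cons x xs ih =>
    by_cases hx : p x = true
    · rw [List.find?_cons]; simp only [hx]
      rcases List.mem_cons.mp hmem with rfl | hmem'
      · rfl
      · have hgt : x > q0 := (List.pairwise_cons.mp hl).1 q0 hmem'
        have := hmax x (List.mem_cons_self) hx
        omega
    · rw [List.find?_cons]
      simp only [show p x = false by simpa using hx]
      rcases List.mem_cons.mp hmem with rfl | hmem'
      · exact absurd hq0 hx
      · exact ih (List.pairwise_cons.mp hl).2 hmem' (fun q hq => hmax q (List.mem_cons_of_mem _ hq))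

-- if the countdown predicate holds at q, q is a candidate page
theorem pvPred_to_page (pn q : Int) (hq : 0 < q) (ks : List String)
    (h : (ks.any (pvGroupB pn q) && !(ks.filter (pvGroupB pn q)).isEmpty) = true) :
    q ∈ pvPages pn ks := by
  rcases Bool.and_eq_true_iff.mp h with ⟨hany, -⟩
  rcases List.any_eq_true.mp hany with ⟨k, hkks, hgb⟩
  rcases pvGroupB_to_page pn q hq k hgb with ⟨hc, hp⟩
  exact (pvMem_pages pn q ks).mpr ⟨k, hkks, hc, hp⟩

-- phase 2 of the two ports agree, for every key list
theorem pvPhase2_eq (pn : Int) (ks : List String) :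
    pvLoopPrev (pvBuildPrev pn ks) (PySem.List.pyRange (pn - 1) 0 (-1)) =
      (match ks.foldl (pvBestStep pn) none with
       | none => "default"
       | some b =>
         match PySem.List.max? (ks.filter (fun k => PySem.Str.isIn "_" k && (pvPage? k == some b))) pvIdxD with
         | some m => m
         | none => "default") := by
  rw [pvBestFold_eq pn ks none, pvLoopPrev_eq_find?]
  simp only [pvBuildPrev_contains pn ks, pvBuildPrev_getD pn ks]
  rcases pvMaxFold_spec (pvPages pn ks) with ⟨hnone, hnil⟩ | ⟨b, hfold, hmem, hall⟩
  · have hfind : (PySem.List.pyRange (pn - 1) 0 (-1)).find?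
        (fun q => ks.any (pvGroupB pn q) && !(ks.filter (pvGroupB pn q)).isEmpty) = none := by
      apply List.find?_eq_none.mpr
      intro q hq hcon
      have h0q : 0 < q := ((pvMem_countdown (pn - 1) q).mp hq).1
      have : q ∈ pvPages pn ks := pvPred_to_page pn q h0q ks hcon
      rw [hnil] at this
      cases this
    rw [hfind, hnone]
  · rcases (pvMem_pages pn b ks).mp hmem with ⟨k0, hk0, hc0, hp0⟩
    rcases pvCandB_page pn k0 hc0 with ⟨p0, hp0', h0p, hppn⟩
    have hpb : p0 = b := by rw [hp0'] at hp0; exact Option.some.inj hp0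
    have h0b : 0 < b := hpb ▸ h0p
    have hbpn : b < pn := hpb ▸ hppn
    have hgb0 : pvGroupB pn b k0 = true := by
      rw [pvGroupB_iff pn b h0b k0, hc0, hp0]
      simp
    have hfilterm : k0 ∈ ks.filter (pvGroupB pn b) := List.mem_filter.mpr ⟨hk0, hgb0⟩
    have hfind : (PySem.List.pyRange (pn - 1) 0 (-1)).find?
        (fun q => ks.any (pvGroupB pn q) && !(ks.filter (pvGroupB pn q)).isEmpty) = some b := by
      apply pvFind?_desc _ _ _ (pvCountdown_pairwise (pn - 1))
      · exact (pvMem_countdown (pn - 1) b).mpr ⟨h0b, by omega⟩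
      · have hany : ks.any (pvGroupB pn b) = true := List.any_eq_true.mpr ⟨k0, hk0, hgb0⟩
        have hne : (ks.filter (pvGroupB pn b)).isEmpty = false := by
          simpa using List.ne_nil_of_mem hfilterm
        rw [hany, hne]
        rfl
      · intro q hq hpq
        have h0q : 0 < q := ((pvMem_countdown (pn - 1) q).mp hq).1
        exact hall q (pvPred_to_page pn q h0q ks hpq)
    rw [hfind, hfold]
    show PySem.List.pyGetD (PySem.List.sorted (ks.filter (pvGroupB pn b)) pvIdxD true) 0 "default"
        = (match PySem.List.max? (ks.filter (fun k => PySem.Str.isIn "_" k && (pvPage? k == some b))) pvIdxD with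
           | some m => m
           | none => "default")
    rw [pvGroup_eq pn b hbpn ks]
    have hchain : PySem.List.pyGetD (PySem.List.sorted (ks.filter (pvGroupB pn b)) pvIdxD true) 0 "default"
        = (PySem.List.max? (ks.filter (pvGroupB pn b)) pvIdxD).getD "default" := by
      rw [PySem.List.pyGetD_zero, List.getD_eq_getElem?_getD, ← List.head?_eq_getElem?,
        pvHead?_sorted_rev]
    rcases pvMax?_spec (ks.filter (pvGroupB pn b)) with ⟨hmn, hgnil⟩ | ⟨m, hmax⟩
    · rw [hgnil] at hfilterm; cases hfilterm
    · rw [hchain, hmax, Option.getD_some]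

-- ===== VERDICT (by name: the statement is the Claim_ definition above) =====
theorem find_closest_title_key_py_spec : Claim_equal_find_closest_title_key_py := by
  intro th pn mc _ _
  unfold Spec_find_closest_title_key_py find_closest_title_key_py find_closest_title_key_py_alt
  cases h : pvFirstHit (PySem.Dict.ofList th) pn (PySem.List.pyRange mc 0 (-1)) with
  | some tk => simp [h]
  | none => simpa [h] using pvPhase2_eq pn (PySem.Dict.ofList th).keys
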